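-- pv_equiv track=rewrite | github.com/jvallery/Notes | Workflow/_archive/ingest_transcripts_legacy.py | _apply_heading_patch
-- ===== SOURCE A (Python) =====
-- def _apply_heading_patch(content: str, heading: str, text: str) -> str:
--     """Append text under a heading."""
--
--     lines = content.split("\n")
--     heading_level = heading.count("#")
--     heading_text = heading.lstrip("# ").strip().lower()
--
--     # Find the heading
--     for i, line in enumerate(lines):
--         if line.strip().lower().startswith(heading.lower()) or \
--            (line.strip().startswith("#" * heading_level + " ") and
--             heading_text in line.strip().lower()):
--
--             # Find end of section (next heading of same or higher level, or "---")
--             j = i + 1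
--             while j < len(lines):
--                 next_line = lines[j].strip()
--                 if next_line.startswith("---"):
--                     break
--                 if next_line.startswith("#"):
--                     # Check heading level
--                     next_level = len(next_line) - len(next_line.lstrip("#"))
--                     if next_level <= heading_level:
--                         break
--                 j += 1
--
--             # Insert before the end marker or next section
--             # Skip blank lines at end of section
--             insert_at = j
--             while insert_at > i + 1 and not lines[insert_at - 1].strip():
--                 insert_at -= 1
--
--             lines.insert(insert_at, text)
--             return "\n".join(lines)
--
--     # Heading not found - add at end
--     lines.append("")
--     lines.append(heading)
--     lines.append("")
--     lines.append(text)
--     return "\n".join(lines)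
-- ===== SOURCE B (Python) =====
-- def _apply_heading_patch(content: str, heading: str, text: str) -> str:
--     """Append text under a heading: stream lines through, buffering blank runs
--     in a pending list that is flushed only after a non-blank line (or after the
--     inserted text), so no boundary index, backtracking or list.insert is needed."""
--     lines = content.split("\n")
--     level = heading.count("#")
--     htext = heading.lstrip("# ").strip().lower()
--     hlow = heading.lower()
--
--     def matches(line):
--         s = line.strip()
--         return s.lower().startswith(hlow) or (s.startswith("#" * level + " ") and htext in s.lower())
--
--     def boundary(line):
--         u = line.strip()
--         return u.startswith("---") or (u.startswith("#") and len(u) - len(u.lstrip("#")) <= level)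
--
--     i = next((k for k, l in enumerate(lines) if matches(l)), None)
--     if i is None:
--         return "\n".join(lines + ["", heading, "", text])
--
--     out = lines[:i + 1]
--     tail = lines[i + 1:]
--     pending = []           # blank lines not yet committed
--     k = 0
--     while k < len(tail) and not boundary(tail[k]):
--         line = tail[k]
--         if line.strip():
--             out += pending
--             pending = []
--             out.append(line)
--         else:
--             pending.append(line)
--         k += 1
--     out.append(text)
--     out += pending
--     out += tail[k:]
--     return "\n".join(out)
-- ===== Notes on version B (the rewrite author's own statement) =====
-- stated objective: alternative
-- what changed: A scans to the section boundary with a while loop, then runs a second backward while loop to step over trailing blank lines and mutates with list.insert; B instead streams the section in one forward pass with a pending-blank-run buffer: blank lines are held back, flushed before the next non-blank line, and at the boundary the text is emitted followed by the buffered blanks, so no insert position is ever computed.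
import Mathlib
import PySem

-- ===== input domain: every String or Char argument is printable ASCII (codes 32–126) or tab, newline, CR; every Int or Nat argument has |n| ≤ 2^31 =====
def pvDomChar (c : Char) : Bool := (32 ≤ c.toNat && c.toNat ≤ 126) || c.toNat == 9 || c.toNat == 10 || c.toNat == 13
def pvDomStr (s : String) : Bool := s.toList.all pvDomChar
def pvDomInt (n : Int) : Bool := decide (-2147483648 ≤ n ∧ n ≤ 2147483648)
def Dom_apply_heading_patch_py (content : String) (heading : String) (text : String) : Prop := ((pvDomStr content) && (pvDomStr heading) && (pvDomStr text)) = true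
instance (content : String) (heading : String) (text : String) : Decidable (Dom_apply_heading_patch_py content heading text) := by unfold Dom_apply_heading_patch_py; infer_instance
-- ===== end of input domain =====

-- B replaces A's boundary scan + backward blank-trimming + list.insert by one streaming pass that
-- buffers blank runs in a pending list flushed after the inserted text (objective: simpler;
-- return value only, neither side mutates caller-visible data).

-- shared helpers (these sub-expressions occur verbatim in both Pythons)
-- 'not line.strip()' — blank line test
def pvBlank (l : String) : Bool := PySem.Str.strip l == ""

-- 'len(s) - len(s.lstrip("#"))' — hand port (lstrip("#") drops leading '#' chars; exact)
def pvHeadLevel (s : String) : Nat := s.toList.length - (s.toList.dropWhile (fun c => c == '#')).length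

-- the heading-match condition of A's for loop, verbatim also in Source B ('"#"*level + " "' is replicate)
def pvMatch (hlow htext : String) (hl : Nat) (line : String) : Bool :=
  let s := PySem.Str.strip line
  PySem.Str.startswith (PySem.Str.lower s) hlow ||
    (PySem.Str.startswith s (String.mk (List.replicate hl '#' ++ [' '])) &&
      PySem.Str.isIn htext (PySem.Str.lower s))

-- ===== PORT A =====
-- A's while-j loop: count lines until the section boundary (the two break tests, in A's order)
def pvAScan (hl : Nat) : List String → Nat
  | [] => 0
  | l :: t =>
    let s := PySem.Str.strip l
    if PySem.Str.startswith s "---" then 0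
    else if PySem.Str.startswith s "#" then
      (if pvHeadLevel s ≤ hl then 0 else pvAScan hl t + 1)
    else pvAScan hl t + 1

-- A's backward while loop on insert_at (lines[insert_at-1] is always in range in A; getD is exact there)
def pvATrim (lines : List String) (base : Nat) (k : Nat) : Nat :=
  if h : base < k ∧ pvBlank (lines.getD (k - 1) "") then pvATrim lines base (k - 1) else k
termination_by k
decreasing_by omega

-- A's for-i-enumerate loop; on the first match it computes j, trims, inserts
def pvAFind (lines : List String) (hlow htext : String) (hl : Nat) (text : String) :
    Nat → List String → Option (List String)
  | _, [] => none
  | i, line :: rest =>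
    if pvMatch hlow htext hl line then
      some (PySem.List.insert lines ((pvATrim lines (i + 1) (i + 1 + pvAScan hl rest) : Nat) : Int) text)
    else pvAFind lines hlow htext hl text (i + 1) rest

def apply_heading_patch_py (content : String) (heading : String) (text : String) : String :=
  let lines := (PySem.Str.split? content "\n").getD []   -- sep "\n" ≠ "" so split? is some
  let hl := PySem.Str.count heading "#"
  -- heading.lstrip("# ").strip().lower() — lstrip("# ") hand-ported as dropWhile over {'#',' '} (exact)
  let htext := PySem.Str.lower (PySem.Str.strip (String.mk (heading.toList.dropWhile (fun c => c == '#' || c == ' '))))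
  let hlow := PySem.Str.lower heading
  match pvAFind lines hlow htext hl text 0 lines with
  | some newlines => PySem.Str.join "\n" newlines
  | none => PySem.Str.join "\n" (lines ++ ["", heading, "", text])

-- ===== PORT B =====
-- Source B's boundary(line) test
def pvBoundary (hl : Nat) (l : String) : Bool :=
  let u := PySem.Str.strip l
  PySem.Str.startswith u "---" || (PySem.Str.startswith u "#" && decide (pvHeadLevel u ≤ hl))

-- Source B's 'next((k for k, l in enumerate(lines) if matches(l)), None)'
def pvBFindIdx (hlow htext : String) (hl : Nat) : Nat → List String → Option Nat
  | _, [] => none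
  | i, l :: t => if pvMatch hlow htext hl l then some i else pvBFindIdx hlow htext hl (i + 1) t

-- Source B's streaming while loop over tail: emits kept lines (flushing the pending blank run before a
-- non-blank line), and at the boundary/end appends text, the pending run, and the remainder
def pvBLoop (hl : Nat) (text : String) : List String → List String → List String
  | [], pending => text :: pending
  | l :: t, pending =>
    if pvBoundary hl l then text :: (pending ++ l :: t)
    else if pvBlank l then pvBLoop hl text t (pending ++ [l])
    else pending ++ l :: pvBLoop hl text t []

def apply_heading_patch_py_alt (content : String) (heading : String) (text : String) : String :=
  let lines := (PySem.Str.split? content "\n").getD []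
  let hl := PySem.Str.count heading "#"
  let htext := PySem.Str.lower (PySem.Str.strip (String.mk (heading.toList.dropWhile (fun c => c == '#' || c == ' '))))
  let hlow := PySem.Str.lower heading
  match pvBFindIdx hlow htext hl 0 lines with
  | none => PySem.Str.join "\n" (lines ++ ["", heading, "", text])
  | some i =>
    PySem.Str.join "\n"
      (PySem.List.slice lines none (some ((i : Int) + 1)) ++
       pvBLoop hl text (PySem.List.slice lines (some ((i : Int) + 1)) none) [])

-- ===== PRECONDITION & SPEC =====
def Spec_apply_heading_patch_py (content : String) (heading : String) (text : String) (out : String) : Prop := out = apply_heading_patch_py_alt content heading text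
instance (content : String) (heading : String) (text : String) (out : String) : Decidable (Spec_apply_heading_patch_py content heading text out) := by unfold Spec_apply_heading_patch_py; infer_instance

-- ===== CLAIM (what is proved, stated in full; the proofs are below) =====
def Claim_equal_apply_heading_patch_py : Prop := ∀ (content : String) (heading : String) (text : String), Dom_apply_heading_patch_py content heading text → Spec_apply_heading_patch_py content heading text (apply_heading_patch_py content heading text)

-- ===== LEMMAS AND PROOFS =====

-- length of a list of lines with its trailing blank lines removed
def pvRlen (b : List String) : Nat := (b.reverse.dropWhile pvBlank).length

theorem pvAScan_le (hl : Nat) (ls : List String) : pvAScan hl ls ≤ ls.length := by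
  induction ls with
  | nil => simp [pvAScan]
  | cons l t ih =>
    simp only [pvAScan, List.length_cons]
    split_ifs <;> omega

theorem pvAScan_cons (hl : Nat) (l : String) (t : List String) :
    pvAScan hl (l :: t) = if pvBoundary hl l then 0 else pvAScan hl t + 1 := by
  simp only [pvAScan, pvBoundary]
  split_ifs with h1 h2 h3 h4 <;> simp_all <;> omega

theorem pvRlen_nil : pvRlen [] = 0 := rfl

theorem pvRlen_append (b : List String) (x : String) :
    pvRlen (b ++ [x]) = if pvBlank x then pvRlen b else b.length + 1 := by
  simp only [pvRlen, List.reverse_append, List.reverse_singleton, List.singleton_append,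
    List.dropWhile_cons]
  split_ifs with h <;> simp [h]

theorem pvRlen_le (b : List String) : pvRlen b ≤ b.length := by
  calc pvRlen b ≤ b.reverse.length := List.length_dropWhile_le _ _
    _ = b.length := List.length_reverse

theorem pvRlen_all_blank (b : List String) (h : ∀ x ∈ b, pvBlank x) : pvRlen b = 0 := by
  simp only [pvRlen, List.length_eq_zero_iff, List.dropWhile_eq_nil_iff]
  intro x hx
  exact h x (List.mem_reverse.mp hx)

theorem pvRlen_append_cons (A : List String) (l : String) (X : List String) (h : ¬ pvBlank l) :
    pvRlen (A ++ l :: X) = A.length + 1 + pvRlen X := by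
  have hrev : (A ++ l :: X).reverse = X.reverse ++ l :: A.reverse := by simp
  simp only [pvRlen, hrev, List.dropWhile_append]
  by_cases h0 : (X.reverse.dropWhile pvBlank).isEmpty
  · rw [if_pos h0, List.dropWhile_cons_of_neg (by simpa using h)]
    have hz : (X.reverse.dropWhile pvBlank).length = 0 := by
      rw [List.isEmpty_iff] at h0
      rw [h0]
      rfl
    simp only [List.length_cons, List.length_reverse]
    omega
  · rw [if_neg h0]
    simp only [List.length_append, List.length_cons, List.length_reverse]
    omega

theorem pvATrim_eq (lines : List String) (base : Nat) :
    ∀ n, base + n ≤ lines.length →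
      pvATrim lines base (base + n) = base + pvRlen ((lines.drop base).take n) := by
  intro n
  induction n with
  | zero =>
    intro _
    rw [pvATrim]
    simp [pvRlen_nil]
  | succ n ih =>
    intro hle
    have hidx : base + n < lines.length := by omega
    have hget : lines.getD (base + n) "" = (lines.drop base)[n]'(by
        simpa [List.length_drop] using (by omega : n < lines.length - base)) := by
      simp [List.getD_eq_getElem?_getD, List.getElem?_drop, List.getElem?_eq_getElem hidx]
    have htake : (lines.drop base).take (n + 1)
        = (lines.drop base).take n ++ [(lines.drop base)[n]'(by
            simpa [List.length_drop] using (by omega : n < lines.length - base))] := by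
      rw [List.take_succ]
      simp [List.getElem?_eq_getElem]
    rw [pvATrim]
    by_cases hb : pvBlank ((lines.drop base)[n]'(by
        simpa [List.length_drop] using (by omega : n < lines.length - base)))
    · have : base < base + (n + 1) ∧ pvBlank (lines.getD (base + (n + 1) - 1) "") := by
        constructor
        · omega
        · have : base + (n + 1) - 1 = base + n := by omega
          rw [this, hget]; exact hb
      rw [dif_pos this]
      have : base + (n + 1) - 1 = base + n := by omega
      rw [this, ih (by omega), htake, pvRlen_append, if_pos hb]
    · by_cases hlt : base < base + (n + 1)
      · have hnot : ¬ (base < base + (n + 1) ∧ pvBlank (lines.getD (base + (n + 1) - 1) "")) := by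
          intro ⟨_, hbl⟩
          have he : base + (n + 1) - 1 = base + n := by omega
          rw [he, hget] at hbl
          exact hb hbl
        rw [dif_neg hnot, htake, pvRlen_append, if_neg hb]
        have : ((lines.drop base).take n).length = n := by
          rw [List.length_take]
          simp [List.length_drop]
          omega
        omega
      · omega

-- B's streaming loop, characterised: with L = pending ++ section (pending an all-blank run),
-- it emits L with text inserted right after L's last non-blank line, then the untouched remainder.
theorem pvBLoop_eq (hl : Nat) (text : String) :
    ∀ (rem pending : List String), (∀ x ∈ pending, pvBlank x) →
      pvBLoop hl text rem pending =
        (pending ++ rem.take (pvAScan hl rem)).take (pvRlen (pending ++ rem.take (pvAScan hl rem)))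
        ++ [text]
        ++ (pending ++ rem.take (pvAScan hl rem)).drop (pvRlen (pending ++ rem.take (pvAScan hl rem)))
        ++ rem.drop (pvAScan hl rem) := by
  intro rem
  induction rem with
  | nil =>
    intro pending hp
    simp [pvBLoop, pvAScan, pvRlen_all_blank pending hp]
  | cons l t ih =>
    intro pending hp
    rw [pvBLoop, pvAScan_cons]
    by_cases hbd : pvBoundary hl l
    · simp [hbd, pvRlen_all_blank pending hp]
    · simp only [hbd, if_false, Bool.false_eq_true]
      have htk : (l :: t).take (pvAScan hl t + 1) = l :: t.take (pvAScan hl t) := by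
        simp [List.take_succ_cons]
      have hdr : (l :: t).drop (pvAScan hl t + 1) = t.drop (pvAScan hl t) := by
        simp [List.drop_succ_cons]
      by_cases hbl : pvBlank l
      · simp only [hbl, if_true]
        rw [ih (pending ++ [l]) (by
          intro x hx
          rcases List.mem_append.mp hx with h | h
          · exact hp x h
          · simp at h; subst h; exact hbl)]
        simp [htk, hdr, List.append_assoc]
      · simp only [hbl, if_false, Bool.false_eq_true]
        rw [ih [] (by simp)]
        simp only [List.nil_append, htk, hdr]
        set X := t.take (pvAScan hl t) with hX
        have hR := pvRlen_append_cons pending l X hbl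
        rw [hR]
        have hp0 : pvRlen (pending ++ l :: X) = pending.length + 1 + pvRlen X := hR
        have htake : (pending ++ l :: X).take (pending.length + 1 + pvRlen X)
            = pending ++ l :: X.take (pvRlen X) := by
          rw [show pending.length + 1 + pvRlen X = pending.length + (1 + pvRlen X) by omega,
            List.take_append]
          simp [List.take_succ_cons, Nat.add_comm]
        have hdrop : (pending ++ l :: X).drop (pending.length + 1 + pvRlen X)
            = X.drop (pvRlen X) := by
          rw [show pending.length + 1 + pvRlen X = pending.length + (1 + pvRlen X) by omega,
            List.drop_append]
          simp [List.drop_succ_cons, Nat.add_comm]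
        rw [htake, hdrop]
        simp [List.append_assoc]

-- the two outer scans agree: A's find-and-insert equals B's find-index-then-stream
theorem pvFind_eq (lines : List String) (hlow htext : String) (hl : Nat) (text : String) :
    ∀ (suf : List String) (i : Nat), suf = lines.drop i →
      pvAFind lines hlow htext hl text i suf =
        (match pvBFindIdx hlow htext hl i suf with
          | none => none
          | some k => some (PySem.List.slice lines none (some ((k : Int) + 1)) ++
              pvBLoop hl text (PySem.List.slice lines (some ((k : Int) + 1)) none) [])) := by
  intro suf
  induction suf with
  | nil => intro i _; rfl
  | cons line rest ih =>
    intro i hsuf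
    rw [pvAFind, pvBFindIdx]
    by_cases hm : pvMatch hlow htext hl line
    · simp only [hm, if_true]
      have hrest : rest = lines.drop (i + 1) := by
        have := congrArg (List.drop 1) hsuf
        simpa [List.drop_drop, Nat.add_comm] using this
      have hlen : i + 1 + rest.length = lines.length := by
        have h1 : (lines.drop i).length = lines.length - i := List.length_drop
        have h2 : i < lines.length := by
          by_contra h
          have : lines.drop i = [] := List.drop_eq_nil_of_le (by omega)
          rw [this] at hsuf; exact absurd hsuf (by simp)
        have := congrArg List.length hsuf
        simp [h1] at this
        omega
      set n := pvAScan hl rest with hn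
      have hnle : n ≤ rest.length := pvAScan_le hl rest
      set sec := rest.take n with hsec
      set R := pvRlen sec with hR
      have hseclen : sec.length = n := by
        rw [hsec, List.length_take]; omega
      have hRle : R ≤ n := by
        have := pvRlen_le sec
        omega
      have hA : pvATrim lines (i + 1) (i + 1 + n) = i + 1 + R := by
        rw [pvATrim_eq lines (i + 1) n (by omega), ← hrest]
      have htail : PySem.List.slice lines (some ((i : Int) + 1)) none = rest := by
        rw [show ((i : Int) + 1) = ((i + 1 : Nat) : Int) by push_cast; ring,
          PySem.List.slice_from lines (by positivity)]
        simp [hrest]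
      rw [htail, hA, pvBLoop_eq hl text rest [] (by simp)]
      simp only [List.nil_append, ← hn, ← hsec, ← hR]
      rw [PySem.List.insert_natCast lines (i + 1 + R) text (by omega)]
      rw [show ((i : Int) + 1) = ((i + 1 : Nat) : Int) by push_cast; ring]
      rw [PySem.List.slice_to lines (b := ((i + 1 : Nat) : Int)) (by positivity)]
      simp only [Int.toNat_natCast]
      have h1 : lines.take (i + 1 + R) = lines.take (i + 1) ++ sec.take R := by
        rw [List.take_add, ← hrest]
        congr 1
        rw [hsec, List.take_take, min_eq_left hRle]
      have h2 : lines.drop (i + 1 + R) = sec.drop R ++ rest.drop n := by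
        rw [← List.drop_drop, ← hrest]
        conv_lhs => rw [show rest = sec ++ rest.drop n by rw [hsec]; simp]
        rw [List.drop_append_of_le_length (by omega)]
      rw [h1, h2]
      simp [List.append_assoc]
    · simp only [hm, if_false, Bool.false_eq_true]
      exact ih (i + 1) (by
        have := congrArg (List.drop 1) hsuf
        simpa [List.drop_drop, Nat.add_comm] using this)

-- ===== VERDICT (by name: the statement is the Claim_ definition above) =====
theorem apply_heading_patch_py_spec : Claim_equal_apply_heading_patch_py := by
  intro content heading text _
  unfold Spec_apply_heading_patch_py
  simp only [apply_heading_patch_py, apply_heading_patch_py_alt]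
  rw [pvFind_eq _ _ _ _ _ _ 0 (List.drop_zero).symm]
  cases pvBFindIdx (PySem.Str.lower heading) _ _ 0 _ <;> rfl
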